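-- pv_equiv track=rewrite | github.com/wooden33/BanG | evaluation/extract_pass_rate.py | extract_path_rate
-- ===== SOURCE A (Python) =====
-- def extract_path_rate(data_list):
--     count_dict = {}
--     pass_dict = {}
--     for item in data_list:
--         label = item["label"]
--         status = item["status"]
--         count_dict[label] = count_dict.get(label, 0) + 1
--         if status == "PASS":
--             pass_dict[label] = pass_dict.get(label, 0) + 1
--     return count_dict, pass_dict
-- ===== SOURCE B (Python) =====
-- def extract_path_rate(data_list):
--     labels = [item["label"] for item in data_list]
--     pass_labels = [item["label"] for item in data_list if item["status"] == "PASS"]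
--     count_dict = {k: labels.count(k) for k in dict.fromkeys(labels)}
--     pass_dict = {k: pass_labels.count(k) for k in dict.fromkeys(pass_labels)}
--     return count_dict, pass_dict
-- ===== Notes on version B (the rewrite author's own statement) =====
-- stated objective: alternative
-- what changed: Replaces A's single combined loop that increments two dicts with a gather-then-count decomposition: collect the label list and the PASS-filtered label list, then build each dict by comprehension over the first-appearance key order (dict.fromkeys) using list.count.
import Mathlib
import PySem

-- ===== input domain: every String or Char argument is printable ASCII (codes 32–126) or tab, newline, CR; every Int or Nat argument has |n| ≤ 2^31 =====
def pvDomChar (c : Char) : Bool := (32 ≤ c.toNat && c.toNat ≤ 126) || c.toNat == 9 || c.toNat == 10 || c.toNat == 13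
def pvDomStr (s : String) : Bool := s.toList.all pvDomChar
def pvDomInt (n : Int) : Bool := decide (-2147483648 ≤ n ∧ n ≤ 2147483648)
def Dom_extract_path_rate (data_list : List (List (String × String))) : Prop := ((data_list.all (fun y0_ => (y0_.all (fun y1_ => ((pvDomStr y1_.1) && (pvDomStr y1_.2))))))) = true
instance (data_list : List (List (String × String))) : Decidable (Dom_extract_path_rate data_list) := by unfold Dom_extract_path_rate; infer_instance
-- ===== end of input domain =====

-- B replaces A's single two-dict counting loop by gather-then-count (label lists, first-appearance keys, list.count); alternative decomposition, not faster.
-- item["k"] on the assoc-list representation of a dict: first match, as per the convention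
def pvItemGet (item : List (String × String)) (k : String) : String :=
  (((item.find? (fun p => p.1 == k)).map (fun p => p.2)).getD "")

-- ===== PORT A =====
def extract_path_rate (data_list : List (List (String × String))) : (List (String × Int)) × (List (String × Int)) :=
  let st := data_list.foldl
    (fun (st : PySem.Dict String Int × PySem.Dict String Int) item =>
      let label := pvItemGet item "label"
      let status := pvItemGet item "status"
      let cd := st.1.insert label (st.1.getD label 0 + 1)
      let pd := if status == "PASS" then st.2.insert label (st.2.getD label 0 + 1) else st.2
      (cd, pd))
    (PySem.Dict.empty, PySem.Dict.empty)
  (st.1.items, st.2.items)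

-- ===== PORT B =====
def extract_path_rate_alt (data_list : List (List (String × String))) : (List (String × Int)) × (List (String × Int)) :=
  let labels := data_list.map (fun item => pvItemGet item "label")
  let pass_labels := (data_list.filter (fun item => pvItemGet item "status" == "PASS")).map (fun item => pvItemGet item "label")
  ((PySem.List.dedup labels).map (fun k => (k, (labels.count k : Int))),
   (PySem.List.dedup pass_labels).map (fun k => (k, (pass_labels.count k : Int))))

-- ===== PRECONDITION & SPEC =====
-- Pre_ excludes exactly the items missing a "label" or "status" key, where Python A (and B) raise KeyError.
def Pre_extract_path_rate (data_list : List (List (String × String))) : Prop :=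
  (data_list.all (fun item => (item.map Prod.fst).contains "label" && (item.map Prod.fst).contains "status")) = true
instance (data_list : List (List (String × String))) : Decidable (Pre_extract_path_rate data_list) := by unfold Pre_extract_path_rate; infer_instance
def pvWitness_extract_path_rate : (List (List (String × String))) :=
  [[("label", "a"), ("status", "PASS")], [("label", "b"), ("status", "FAIL")], [("label", "a"), ("status", "PASS")]]

def Spec_extract_path_rate (data_list : List (List (String × String))) (out : (List (String × Int)) × (List (String × Int))) : Prop := out = extract_path_rate_alt data_list
instance (data_list : List (List (String × String))) (out : (List (String × Int)) × (List (String × Int))) : Decidable (Spec_extract_path_rate data_list out) := by unfold Spec_extract_path_rate; infer_instance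

-- ===== CLAIM (what is proved, stated in full; the proofs are below) =====
def Claim_equal_extract_path_rate : Prop := ∀ (data_list : List (List (String × String))), Dom_extract_path_rate data_list → Pre_extract_path_rate data_list → Spec_extract_path_rate data_list (extract_path_rate data_list)

-- ===== LEMMAS AND PROOFS =====

-- A's combined fold over pairs of dicts splits into two independent counting folds,
-- one over all labels and one over the PASS-filtered labels.
theorem pv_fold_split (dl : List (List (String × String)))
    (c p : PySem.Dict String Int) :
    dl.foldl
      (fun (st : PySem.Dict String Int × PySem.Dict String Int) item =>
        let label := pvItemGet item "label"
        let status := pvItemGet item "status"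
        let cd := st.1.insert label (st.1.getD label 0 + 1)
        let pd := if status == "PASS" then st.2.insert label (st.2.getD label 0 + 1) else st.2
        (cd, pd)) (c, p)
    = ((dl.map (fun item => pvItemGet item "label")).foldl
         (fun d x => d.insert x (d.getD x 0 + 1)) c,
       ((dl.filter (fun item => pvItemGet item "status" == "PASS")).map
          (fun item => pvItemGet item "label")).foldl
         (fun d x => d.insert x (d.getD x 0 + 1)) p) := by
  induction dl generalizing c p with
  | nil => rfl
  | cons hd tl ih =>
    by_cases h : (pvItemGet hd "status" == "PASS") = true
    · simp only [List.foldl_cons, List.map_cons, List.filter_cons, h, if_true]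
      rw [← ih]
    · have h' : (pvItemGet hd "status" == "PASS") = false := by simpa using h
      simp only [List.foldl_cons, List.map_cons, List.filter_cons, h', Bool.false_eq_true,
        if_false]
      rw [← ih]

-- ===== VERDICT (by name: the statement is the Claim_ definition above) =====
theorem extract_path_rate_spec : Claim_equal_extract_path_rate := by
  intro dl _ _
  show extract_path_rate dl = extract_path_rate_alt dl
  unfold extract_path_rate extract_path_rate_alt
  rw [pv_fold_split]
  simp only [PySem.Dict.foldl_insert_getD_add_one_eq_counter, PySem.Dict.items_counter,
    PySem.List.dedup_eq_ofList]
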